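-- pv_equiv track=rewrite | github.com/amerhwitat/nlp | thamudic.py | group_line_boxes_into_words
-- ===== SOURCE A (Python) =====
-- def group_line_boxes_into_words(line_boxes, gap_threshold=18):
--     """Group boxes in a line into words by horizontal gap threshold."""
--     if not line_boxes:
--         return []
--     words = []
--     current = [line_boxes[0]]
--     for prev, cur in zip(line_boxes, line_boxes[1:]):
--         gap = cur[0] - prev[2]
--         if gap <= gap_threshold:
--             current.append(cur)
--         else:
--             words.append(current)
--             current = [cur]
--     words.append(current)
--     return words
-- ===== SOURCE B (Python) =====
-- def group_line_boxes_into_words(line_boxes, gap_threshold=18):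
--     """Group boxes in a line into words by horizontal gap threshold.
--
--     Right-to-left single pass: each box either joins the group it precedes
--     (when the next box starts within gap_threshold of its right edge) or
--     opens a new group in front of the result.
--     """
--     words = []
--     for box in reversed(line_boxes):
--         if words and words[0][0][0] - box[2] <= gap_threshold:
--             words[0].insert(0, box)
--         else:
--             words.insert(0, [box])
--     return words
-- ===== Notes on version B (the rewrite author's own statement) =====
-- stated objective: alternative
-- what changed: Replaces A's left-to-right zip loop with a (words, current) accumulator and final flush by a single right-to-left pass that builds the group list back-to-front, either prepending each box into the group it precedes or opening a new group, so no separate 'current' buffer or flush step exists.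
import Mathlib
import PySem

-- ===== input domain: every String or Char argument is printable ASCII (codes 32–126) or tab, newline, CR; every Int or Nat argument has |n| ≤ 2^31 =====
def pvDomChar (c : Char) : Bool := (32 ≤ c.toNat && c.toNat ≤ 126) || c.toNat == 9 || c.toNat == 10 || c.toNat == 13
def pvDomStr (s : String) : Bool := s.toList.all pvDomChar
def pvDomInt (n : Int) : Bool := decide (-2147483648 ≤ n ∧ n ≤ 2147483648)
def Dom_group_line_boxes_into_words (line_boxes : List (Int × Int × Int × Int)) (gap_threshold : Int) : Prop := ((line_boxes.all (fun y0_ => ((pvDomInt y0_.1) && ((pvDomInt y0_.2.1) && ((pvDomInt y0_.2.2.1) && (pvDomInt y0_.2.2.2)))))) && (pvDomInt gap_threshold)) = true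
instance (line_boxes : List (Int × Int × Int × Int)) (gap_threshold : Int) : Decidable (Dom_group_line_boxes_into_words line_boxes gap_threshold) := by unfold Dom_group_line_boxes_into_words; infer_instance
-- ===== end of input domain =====

-- B groups boxes in one right-to-left pass building the result back-to-front,
-- instead of A's left-to-right loop with a 'current' accumulator and final flush.
-- Equivalence is about the return value; neither program mutates its arguments.


-- ===== PORT A =====
-- literal port of A: early return on [], then a left fold over zip(line_boxes, line_boxes[1:])
-- carrying (words, current), with a final flush of 'current'.
def group_line_boxes_into_words (line_boxes : List (Int × Int × Int × Int)) (gap_threshold : Int) : List (List (Int × Int × Int × Int)) :=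
  match line_boxes with
  | [] => []
  | x :: _ =>
    let fin := (line_boxes.zip line_boxes.tail).foldl
      (fun (st : List (List (Int × Int × Int × Int)) × List (Int × Int × Int × Int)) pc =>
        let gap := pc.2.1 - pc.1.2.2.1
        if gap ≤ gap_threshold then (st.1, st.2 ++ [pc.2])
        else (st.1 ++ [st.2], [pc.2]))
      ([], [x])
    fin.1 ++ [fin.2]

-- ===== PORT B =====
-- literal port of B: right-to-left pass (a fold over the structure from the right);
-- each box joins the group in front of it or opens a new group.
def group_line_boxes_into_words_alt (line_boxes : List (Int × Int × Int × Int)) (gap_threshold : Int) : List (List (Int × Int × Int × Int)) :=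
  line_boxes.foldr
    (fun box words =>
      match words with
      | (b :: w) :: ws =>
        if b.1 - box.2.2.1 ≤ gap_threshold then (box :: b :: w) :: ws
        else [box] :: (b :: w) :: ws
      | _ => [box] :: words)
    []

-- ===== PRECONDITION & SPEC =====
def Spec_group_line_boxes_into_words (line_boxes : List (Int × Int × Int × Int)) (gap_threshold : Int) (out : List (List (Int × Int × Int × Int))) : Prop := out = group_line_boxes_into_words_alt line_boxes gap_threshold
instance (line_boxes : List (Int × Int × Int × Int)) (gap_threshold : Int) (out : List (List (Int × Int × Int × Int))) : Decidable (Spec_group_line_boxes_into_words line_boxes gap_threshold out) := by unfold Spec_group_line_boxes_into_words; infer_instance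

-- ===== CLAIM (what is proved, stated in full; the proofs are below) =====
def Claim_equal_group_line_boxes_into_words : Prop := ∀ (line_boxes : List (Int × Int × Int × Int)) (gap_threshold : Int), Dom_group_line_boxes_into_words line_boxes gap_threshold → Spec_group_line_boxes_into_words line_boxes gap_threshold (group_line_boxes_into_words line_boxes gap_threshold)

-- ===== LEMMAS AND PROOFS =====

-- unfolding one step of B's right fold
lemma alt_cons (t : Int) (x : Int × Int × Int × Int) (l : List (Int × Int × Int × Int)) :
    group_line_boxes_into_words_alt (x :: l) t =
      match group_line_boxes_into_words_alt l t with
      | (b :: w) :: ws =>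
        if b.1 - x.2.2.1 ≤ t then (x :: b :: w) :: ws
        else [x] :: (b :: w) :: ws
      | _ => [x] :: group_line_boxes_into_words_alt l t := rfl

-- B's result on prev :: rest always has a first group headed by prev.
lemma alt_head_shape (t : Int) (prev : Int × Int × Int × Int) (rest : List (Int × Int × Int × Int)) :
    ∃ h tl, group_line_boxes_into_words_alt (prev :: rest) t = (prev :: h) :: tl := by
  cases rest with
  | nil => exact ⟨[], [], rfl⟩
  | cons y rs =>
    obtain ⟨h', tl', e⟩ := alt_head_shape t y rs
    rw [alt_cons, e]
    by_cases hg : y.1 - prev.2.2.1 ≤ t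
    · exact ⟨y :: h', tl', by simp [hg]⟩
    · exact ⟨[], (y :: h') :: tl', by simp [hg]⟩

-- A's loop invariant: running the fold from state (words, cur) over the pairs of
-- prev :: rest and flushing yields 'words' followed by B's groups of prev :: rest,
-- with 'cur' replacing the leading 'prev' of the first group.
lemma loopA_eq (t : Int) (rest : List (Int × Int × Int × Int)) :
    ∀ (prev : Int × Int × Int × Int) (words : List (List (Int × Int × Int × Int)))
      (cur h : List (Int × Int × Int × Int)) (tl : List (List (Int × Int × Int × Int))),
      group_line_boxes_into_words_alt (prev :: rest) t = (prev :: h) :: tl →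
      (let fin := ((prev :: rest).zip rest).foldl
        (fun (st : List (List (Int × Int × Int × Int)) × List (Int × Int × Int × Int)) pc =>
          let gap := pc.2.1 - pc.1.2.2.1
          if gap ≤ t then (st.1, st.2 ++ [pc.2])
          else (st.1 ++ [st.2], [pc.2]))
        (words, cur)
      fin.1 ++ [fin.2]) = words ++ (cur ++ h) :: tl := by
  induction rest with
  | nil =>
    intro prev words cur h tl he
    simp only [group_line_boxes_into_words_alt, List.foldr_nil, List.foldr_cons] at he
    have hh : h = [] ∧ tl = [] := by
      cases he; exact ⟨rfl, rfl⟩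
    obtain ⟨rfl, rfl⟩ := hh
    simp
  | cons y rs ih =>
    intro prev words cur h tl he
    obtain ⟨h', tl', e'⟩ := alt_head_shape t y rs
    have hstep : group_line_boxes_into_words_alt (prev :: y :: rs) t =
        if y.1 - prev.2.2.1 ≤ t then (prev :: y :: h') :: tl'
        else [prev] :: (y :: h') :: tl' := by
      rw [alt_cons, e']
    by_cases hg : y.1 - prev.2.2.1 ≤ t
    · rw [hstep, if_pos hg] at he
      have hh : h = y :: h' ∧ tl = tl' := by cases he; exact ⟨rfl, rfl⟩
      rw [hh.1, hh.2]
      have := ih y words (cur ++ [y]) h' tl' e'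
      simp only [List.zip_cons_cons, List.foldl_cons, if_pos hg] at this ⊢
      simpa [List.append_assoc] using this
    · rw [hstep, if_neg hg] at he
      have hh : h = [] ∧ tl = (y :: h') :: tl' := by cases he; exact ⟨rfl, rfl⟩
      rw [hh.1, hh.2]
      have := ih y (words ++ [cur]) [y] h' tl' e'
      simp only [List.zip_cons_cons, List.foldl_cons, if_neg hg] at this ⊢
      simpa [List.append_assoc] using this

-- ===== VERDICT (by name: the statement is the Claim_ definition above) =====
theorem group_line_boxes_into_words_spec : Claim_equal_group_line_boxes_into_words := by
  intro line_boxes t _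
  unfold Spec_group_line_boxes_into_words
  cases line_boxes with
  | nil => rfl
  | cons x rest =>
    obtain ⟨h, tl, e⟩ := alt_head_shape t x rest
    have := loopA_eq t rest x [] [x] h tl e
    simp only [group_line_boxes_into_words, List.tail_cons]
    rw [e]
    simpa using this
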